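-- pv_equiv track=rewrite | github.com/manarAlhaj/dual-issue-josdc | dual_fixed/assembler.py | initialize_available_regs
-- ===== SOURCE A (Python) =====
-- def get_used_registers(instructions):
--     used = set()
--     for instr in instructions:
--         parts = parse_instruction(instr)
--         for part in parts:
--             if part.startswith("$"):
--                 used.add(part)
--     return used
--
-- def initialize_available_regs(instructions):
--     used = get_used_registers(instructions)
--     avail = []
--     for i in range(1, 32):
--         r = f"${i}"
--         if r not in used:
--             avail.append(r)
--     return avail
--
-- def parse_instruction(instruction):
--     return instruction.replace(",", "").split()
-- ===== SOURCE B (Python) =====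
-- def initialize_available_regs(instructions):
--     # Start with the full pool and delete registers as they are seen: no used-set,
--     # no final candidate scan; the pool's ascending order is preserved by removal.
--     avail = [f"${i}" for i in range(1, 32)]
--     for instr in instructions:
--         for tok in instr.replace(",", "").split():
--             if tok in avail:
--                 avail.remove(tok)
--     return avail
-- ===== Notes on version B (the rewrite author's own statement) =====
-- stated objective: alternative
-- what changed: B builds no used-register set at all: it starts from the full pool [$1..$31] and deletes each register from the pool as it is encountered while scanning the instructions, returning the surviving pool (deletion-driven, order preserved by removal) instead of A's collect-then-filter candidate scan.
import Mathlib
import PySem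

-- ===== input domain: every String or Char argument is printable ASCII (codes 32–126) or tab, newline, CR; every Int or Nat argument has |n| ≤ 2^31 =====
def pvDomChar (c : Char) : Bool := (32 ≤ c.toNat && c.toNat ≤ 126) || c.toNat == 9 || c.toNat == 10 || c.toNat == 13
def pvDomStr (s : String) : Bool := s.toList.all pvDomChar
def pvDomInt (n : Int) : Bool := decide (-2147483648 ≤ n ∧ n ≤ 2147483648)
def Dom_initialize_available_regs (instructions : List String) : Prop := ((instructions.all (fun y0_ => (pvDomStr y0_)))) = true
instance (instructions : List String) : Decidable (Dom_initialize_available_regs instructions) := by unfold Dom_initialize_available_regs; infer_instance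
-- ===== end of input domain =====

-- B replaces A's collect-used-set-then-filter-candidates strategy by deletion from the
-- full register pool while scanning (alternative decomposition; no used set is built).

-- ===== PORT A =====
def parse_instruction (instruction : String) : List String :=
  PySem.Str.split₀ (PySem.Str.replace instruction "," "")

def get_used_registers (instructions : List String) : PySem.Set String :=
  instructions.foldl (fun used instr =>
    (parse_instruction instr).foldl (fun used part =>
      if PySem.Str.startswith part "$" then PySem.Set.add used part else used) used)
    PySem.Set.empty

def initialize_available_regs (instructions : List String) : List String :=
  let used := get_used_registers instructions
  (PySem.List.pyRange 1 32 1).foldl (fun avail i =>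
    let r := "$" ++ PySem.Int.toStr i
    if PySem.Set.contains used r then avail else avail ++ [r]) []

-- ===== PORT B =====
def initialize_available_regs_alt (instructions : List String) : List String :=
  let avail0 := (PySem.List.pyRange 1 32 1).map (fun i => "$" ++ PySem.Int.toStr i)
  instructions.foldl (fun avail instr =>
    (PySem.Str.split₀ (PySem.Str.replace instr "," "")).foldl (fun avail tok =>
      if avail.contains tok then
        -- list.remove guarded by membership: remove? is some here, getD never fires
        (PySem.List.remove? avail tok).getD avail
      else avail) avail) avail0

-- ===== PRECONDITION & SPEC =====
def Spec_initialize_available_regs (instructions : List String) (out : List String) : Prop := out = initialize_available_regs_alt instructions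
instance (instructions : List String) (out : List String) : Decidable (Spec_initialize_available_regs instructions out) := by unfold Spec_initialize_available_regs; infer_instance

-- ===== CLAIM (what is proved, stated in full; the proofs are below) =====
def Claim_equal_initialize_available_regs : Prop := ∀ (instructions : List String), Dom_initialize_available_regs instructions → Spec_initialize_available_regs instructions (initialize_available_regs instructions)

-- ===== LEMMAS AND PROOFS =====

def pvTokens (instructions : List String) : List String :=
  instructions.flatMap (fun instr => PySem.Str.split₀ (PySem.Str.replace instr "," ""))

def pvStep (avail : List String) (tok : String) : List String :=
  if avail.contains tok then (PySem.List.remove? avail tok).getD avail else avail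

-- a per-instruction inner fold is the fold over the flattened stream
lemma foldl_flatMap {α β σ : Type} (g : α → List β) (f : σ → β → σ) (l : List α) (init : σ) :
    l.foldl (fun s a => (g a).foldl f s) init = (l.flatMap g).foldl f init := by
  induction l generalizing init with
  | nil => rfl
  | cons a t ih => simp [List.flatMap_cons, List.foldl_append, ih]

-- B's nested loops are the single fold of pvStep over the flattened token stream
lemma alt_eq_foldl_tokens (instructions : List String) :
    initialize_available_regs_alt instructions =
      (pvTokens instructions).foldl pvStep
        ((PySem.List.pyRange 1 32 1).map (fun i => "$" ++ PySem.Int.toStr i)) := by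
  unfold initialize_available_regs_alt pvTokens pvStep
  exact foldl_flatMap _ _ _ _

-- one deletion step on a duplicate-free pool is a filter
lemma step_eq_filter (avail : List String) (h : avail.Nodup) (t : String) :
    pvStep avail t = avail.filter (fun r => r != t) := by
  unfold pvStep
  by_cases hm : t ∈ avail
  · have hc : avail.contains t = true := by simpa using hm
    rw [hc, if_pos rfl, PySem.List.remove?_eq_some_erase _ _ hm]
    simp [List.Nodup.erase_eq_filter h]
  · have hc : avail.contains t = false := by simpa using hm
    rw [hc, if_neg (by simp)]
    symm
    apply List.filter_eq_self.mpr
    intro r hr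
    simp only [bne_iff_ne, ne_eq]
    exact fun he => hm (he ▸ hr)

-- folding deletions over the token stream filters the pool by non-membership
lemma foldl_step_eq_filter (T : List String) (avail : List String) (h : avail.Nodup) :
    T.foldl pvStep avail = avail.filter (fun r => !(T.contains r)) := by
  induction T generalizing avail with
  | nil => simp
  | cons t T ih =>
    rw [List.foldl_cons, step_eq_filter avail h t,
        ih _ (h.filter _), List.filter_filter]
    apply List.filter_congr
    intro r _
    by_cases hrt : r = t <;> simp [hrt]

-- a conditional-add fold is the add fold over the filtered stream
lemma foldl_cond_add (p : String → Bool) (T : List String) (s : PySem.Set String) :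
    T.foldl (fun used part => if p part then PySem.Set.add used part else used) s
      = (T.filter p).foldl PySem.Set.add s := by
  induction T generalizing s with
  | nil => rfl
  | cons x xs ih => by_cases hx : p x = true <;> simp [hx, ih]

-- A's "used" set is the set of the $-prefixed tokens of the flat stream, in order
lemma used_eq (instructions : List String) :
    get_used_registers instructions =
      PySem.Set.ofList ((pvTokens instructions).filter (fun t => PySem.Str.startswith t "$")) := by
  unfold get_used_registers pvTokens parse_instruction
  rw [PySem.Set.ofList_eq_foldl,
      foldl_flatMap (fun instr => PySem.Str.split₀ (PySem.Str.replace instr "," ""))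
        (fun used part => if PySem.Str.startswith part "$" then PySem.Set.add used part else used)]
  exact foldl_cond_add _ _ _

-- A unrolled: append-if over candidates is map-then-filter
lemma foldl_skip_if (p : String → Bool) (f : Int → String) (l : List Int) (acc : List String) :
    l.foldl (fun acc x => if p (f x) then acc else acc ++ [f x]) acc
      = acc ++ (l.map f).filter (fun r => !p r) := by
  induction l generalizing acc with
  | nil => simp
  | cons a t ih =>
    by_cases h : p (f a) = true <;> simp [h, ih]

theorem initialize_available_regs_spec : Claim_equal_initialize_available_regs := by
  intro instructions _
  unfold Spec_initialize_available_regs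
  rw [alt_eq_foldl_tokens,
      foldl_step_eq_filter _ _ (by decide)]
  unfold initialize_available_regs
  rw [foldl_skip_if (fun r => PySem.Set.contains (get_used_registers instructions) r)
        (fun i => "$" ++ PySem.Int.toStr i) _ []]
  simp only [List.nil_append]
  symm
  apply List.filter_congr
  intro r hr
  have hstart : PySem.Str.startswith r "$" = true := by
    have hall : ∀ x ∈ (PySem.List.pyRange 1 32 1).map (fun i => "$" ++ PySem.Int.toStr i),
        PySem.Str.startswith x "$" = true := by decide
    exact hall r hr
  rw [used_eq]
  congr 1
  rw [Bool.eq_iff_iff, PySem.Set.contains_iff, PySem.Set.mem_ofList, List.mem_filter]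
  constructor
  · intro hc
    exact ⟨by simpa using hc, hstart⟩
  · intro hc
    simpa using hc.1
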